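-- pv_equiv track=rewrite | github.com/jbylund/arcane_tutor | api/parsing/scryfall_nodes.py | calculate_devotion
-- ===== SOURCE A (Python) =====
-- def calculate_devotion(mana_cost_str: str) -> dict:
--     """Calculate devotion from a mana cost string, handling split mana costs properly.
--
--     For split mana costs like {R/G}, each color contributes 1 to its respective devotion.
--     For example, {R/G} contributes 1 to both R devotion and G devotion.
--     """
--     devotion = {"W": [], "U": [], "B": [], "R": [], "G": [], "C": []}
--     for ichar in mana_cost_str.upper().strip():
--         current_devotion = devotion.get(ichar)
--         if current_devotion is not None:
--             current_devotion.append(len(current_devotion) + 1)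
--     # Remove colors with 0 devotion for cleaner storage
--     return {
--         color: color_devotion
--         for color, color_devotion in devotion.items()
--         if color_devotion
--     }
-- ===== SOURCE B (Python) =====
-- def calculate_devotion(mana_cost_str: str) -> dict:
--     """Two-pass: count each color symbol, then build [1..count] lists in canonical order."""
--     symbols = mana_cost_str.upper().strip()
--     result = {}
--     for color in "WUBRGC":
--         n = symbols.count(color)
--         if n:
--             result[color] = list(range(1, n + 1))
--     return result
-- ===== Notes on version B (the rewrite author's own statement) =====
-- stated objective: simpler
-- what changed: A grows per-color lists one element at a time inside a single loop over the characters; B makes a counting pass (str.count per color symbol) and then a separate construction pass that emits list(range(1, n+1)) for each color with a positive count, in canonical WUBRGC order; the counting runs in C (str.count) instead of a Python-level per-character loop.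
import Mathlib
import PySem

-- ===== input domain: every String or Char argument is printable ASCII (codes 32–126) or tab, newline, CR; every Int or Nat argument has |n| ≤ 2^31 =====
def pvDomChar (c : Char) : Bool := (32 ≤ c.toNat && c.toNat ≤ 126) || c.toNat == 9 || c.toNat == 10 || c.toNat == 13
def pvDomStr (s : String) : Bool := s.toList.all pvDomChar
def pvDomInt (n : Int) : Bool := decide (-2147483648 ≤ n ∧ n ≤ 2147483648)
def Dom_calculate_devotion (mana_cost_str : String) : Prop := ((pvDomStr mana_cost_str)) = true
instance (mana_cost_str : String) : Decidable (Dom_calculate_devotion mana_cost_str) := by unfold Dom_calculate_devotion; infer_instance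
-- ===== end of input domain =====

-- B replaces A's single incremental-append loop by two passes — count each color symbol with
-- str.count, then build list(range(1, n+1)) per color in canonical order — a simpler decomposition.

-- ===== PORT A =====
-- one loop step: devotion.get(ichar); if present, append len+1 in place (= overwrite at the same position)
def devStep (d : PySem.Dict String (List Int)) (c : Char) : PySem.Dict String (List Int) :=
  match d.get? (String.mk [c]) with
  | some cur => d.insert (String.mk [c]) (cur ++ [((cur.length : Int) + 1)])
  | none => d

def calculate_devotion (mana_cost_str : String) : List (String × List Int) :=
  let init : PySem.Dict String (List Int) :=
    PySem.Dict.ofList [("W", []), ("U", []), ("B", []), ("R", []), ("G", []), ("C", [])]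
  let devotion := (PySem.Chars.strip (PySem.Chars.upper mana_cost_str.toList)).foldl devStep init
  devotion.items.filter (fun p => !p.2.isEmpty)

-- ===== PORT B =====
def calculate_devotion_alt (mana_cost_str : String) : List (String × List Int) :=
  let symbols := PySem.Chars.strip (PySem.Chars.upper mana_cost_str.toList)
  ['W', 'U', 'B', 'R', 'G', 'C'].foldl
    (fun res c =>
      let n := PySem.Chars.count symbols [c]   -- symbols.count(color), a one-char needle
      if n ≠ 0 then res ++ [(String.mk [c], PySem.List.pyRange 1 ((n : Int) + 1) 1)] else res)
    []

-- ===== PRECONDITION & SPEC =====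
def Spec_calculate_devotion (mana_cost_str : String) (out : List (String × List Int)) : Prop := out = calculate_devotion_alt mana_cost_str
instance (mana_cost_str : String) (out : List (String × List Int)) : Decidable (Spec_calculate_devotion mana_cost_str out) := by unfold Spec_calculate_devotion; infer_instance

-- ===== CLAIM (what is proved, stated in full; the proofs are below) =====
def Claim_equal_calculate_devotion : Prop := ∀ (mana_cost_str : String), Dom_calculate_devotion mana_cost_str → Spec_calculate_devotion mana_cost_str (calculate_devotion mana_cost_str)

-- ===== LEMMAS AND PROOFS =====

-- [1, 2, …, n] as built by A's repeated appends
def upTo (n : Nat) : List Int := (List.range n).map (fun i => Int.ofNat i + 1)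

theorem upTo_succ (n : Nat) : upTo (n + 1) = upTo n ++ [(n : Int) + 1] := by
  simp [upTo, List.range_succ]

theorem length_upTo (n : Nat) : (upTo n).length = n := by simp [upTo]

theorem upTo_eq_pyRange (n : Nat) : upTo n = PySem.List.pyRange 1 ((n : Int) + 1) 1 := by
  rw [PySem.List.pyRange_one]
  have h : ((n : Int) + 1 - 1).toNat = n := by omega
  rw [h, upTo]
  apply List.map_congr_left
  intro i _
  simp [Int.ofNat_eq_natCast]; omega

theorem upTo_isEmpty (n : Nat) : (upTo n).isEmpty = (n == 0) := by
  cases n <;> simp [upTo, List.range_succ]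

-- Python str.count with a one-character needle is the character count
theorem count_singleton (s : List Char) (c : Char) : PySem.Chars.count s [c] = s.count c := by
  simp only [PySem.Chars.count, List.isEmpty_cons, Bool.false_eq_true, reduceIte]
  suffices h : ∀ (l : List Char) (fuel acc : Nat), l.length ≤ fuel →
      PySem.Chars.count.go [c] fuel l acc = acc + l.count c by
    simpa using h s s.length 0 le_rfl
  intro l
  induction l with
  | nil => intro fuel acc _; cases fuel <;> simp [PySem.Chars.count.go]
  | cons h t ih =>
    intro fuel acc hf
    cases fuel with
    | zero => simp at hf
    | succ f =>
      simp only [PySem.Chars.count.go]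
      by_cases hc : h = c
      · subst hc
        simp [List.isPrefixOf, ih f (acc + 1) (by simpa using hf)]
        omega
      · simp [List.isPrefixOf, hc, ih f acc (by simpa using hf), Ne.symm hc]

theorem toList_mk (l : List Char) : (String.mk l).toList = l := Eq.symm (String.ofList_eq.mp rfl)

theorem strmk_ne (d c : Char) (hd : d ≠ c) : (String.mk [d] == String.mk [c]) = false := by
  simp only [beq_eq_false_iff_ne, ne_eq]
  intro h
  have h2 : (String.mk [d]).toList = (String.mk [c]).toList := congrArg String.toList h
  rw [toList_mk, toList_mk] at h2
  exact hd (by simpa using h2)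

theorem devStep_inv (ch : Char) (w u b r g k : Nat) :
    devStep (PySem.Dict.mk
      [("W", upTo w), ("U", upTo u), ("B", upTo b), ("R", upTo r), ("G", upTo g), ("C", upTo k)]) ch
    = PySem.Dict.mk
      [("W", upTo (if ch = 'W' then w + 1 else w)), ("U", upTo (if ch = 'U' then u + 1 else u)),
       ("B", upTo (if ch = 'B' then b + 1 else b)), ("R", upTo (if ch = 'R' then r + 1 else r)),
       ("G", upTo (if ch = 'G' then g + 1 else g)), ("C", upTo (if ch = 'C' then k + 1 else k))] := by
  by_cases h1 : ch = 'W'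
  case pos =>
    subst h1
    simp [devStep, PySem.Dict.get?, PySem.Dict.insert, length_upTo,
      show String.mk ['W'] = "W" from rfl, ← upTo_succ]
  case neg =>
  by_cases h2 : ch = 'U'
  case pos =>
    subst h2
    simp [devStep, PySem.Dict.get?, PySem.Dict.insert, length_upTo, h1,
      show String.mk ['U'] = "U" from rfl, ← upTo_succ]
  case neg =>
  by_cases h3 : ch = 'B'
  case pos =>
    subst h3
    simp [devStep, PySem.Dict.get?, PySem.Dict.insert, length_upTo, h1, h2,
      show String.mk ['B'] = "B" from rfl, ← upTo_succ]
  case neg =>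
  by_cases h4 : ch = 'R'
  case pos =>
    subst h4
    simp [devStep, PySem.Dict.get?, PySem.Dict.insert, length_upTo, h1, h2, h3,
      show String.mk ['R'] = "R" from rfl, ← upTo_succ]
  case neg =>
  by_cases h5 : ch = 'G'
  case pos =>
    subst h5
    simp [devStep, PySem.Dict.get?, PySem.Dict.insert, length_upTo, h1, h2, h3, h4,
      show String.mk ['G'] = "G" from rfl, ← upTo_succ]
  case neg =>
  by_cases h6 : ch = 'C'
  case pos =>
    subst h6
    simp [devStep, PySem.Dict.get?, PySem.Dict.insert, length_upTo, h1, h2, h3, h4, h5,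
      show String.mk ['C'] = "C" from rfl, ← upTo_succ]
  case neg =>
    simp [devStep, PySem.Dict.get?,
      show ("W" : String) = String.mk ['W'] from rfl, show ("U" : String) = String.mk ['U'] from rfl,
      show ("B" : String) = String.mk ['B'] from rfl, show ("R" : String) = String.mk ['R'] from rfl,
      show ("G" : String) = String.mk ['G'] from rfl, show ("C" : String) = String.mk ['C'] from rfl,
      strmk_ne 'W' ch (fun he => h1 he.symm), strmk_ne 'U' ch (fun he => h2 he.symm),
      strmk_ne 'B' ch (fun he => h3 he.symm), strmk_ne 'R' ch (fun he => h4 he.symm),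
      strmk_ne 'G' ch (fun he => h5 he.symm), strmk_ne 'C' ch (fun he => h6 he.symm),
      h1, h2, h3, h4, h5, h6]

theorem dev_inv (cs : List Char) (w u b r g k : Nat) :
    (cs.foldl devStep (PySem.Dict.mk
      [("W", upTo w), ("U", upTo u), ("B", upTo b), ("R", upTo r), ("G", upTo g), ("C", upTo k)])).items
    = [("W", upTo (w + cs.count 'W')), ("U", upTo (u + cs.count 'U')), ("B", upTo (b + cs.count 'B')),
       ("R", upTo (r + cs.count 'R')), ("G", upTo (g + cs.count 'G')), ("C", upTo (k + cs.count 'C'))] := by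
  induction cs generalizing w u b r g k with
  | nil => simp
  | cons ch t ih =>
    rw [List.foldl_cons, devStep_inv, ih]
    have e : ∀ (d : Char) (a : Nat),
        (if ch = d then a + 1 else a) + List.count d t = a + List.count d (ch :: t) := by
      intro d a
      rw [List.count_cons]
      by_cases h : ch = d
      · subst h; simp; omega
      · simp [h]
    rw [e, e, e, e, e, e]

-- ===== VERDICT (by name: the statement is the Claim_ definition above) =====
theorem calculate_devotion_spec : Claim_equal_calculate_devotion := by
  unfold Claim_equal_calculate_devotion
  intro s _
  unfold Spec_calculate_devotion calculate_devotion calculate_devotion_alt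
  set cs := PySem.Chars.strip (PySem.Chars.upper s.toList) with hcs
  have hinv := dev_inv cs 0 0 0 0 0 0
  simp only [Nat.zero_add] at hinv
  show (cs.foldl devStep _).items.filter _ = _
  rw [show (PySem.Dict.ofList [("W", ([] : List Int)), ("U", []), ("B", []), ("R", []), ("G", []), ("C", [])])
      = PySem.Dict.mk [("W", upTo 0), ("U", upTo 0), ("B", upTo 0), ("R", upTo 0), ("G", upTo 0), ("C", upTo 0)] from rfl,
      hinv]
  simp only [List.foldl_cons, List.foldl_nil, count_singleton, ← upTo_eq_pyRange,
    List.filter_cons, List.filter_nil, upTo_isEmpty, Bool.not_eq_eq_eq_not, Bool.not_true,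
    beq_eq_false_iff_ne, ne_eq]
  by_cases hW : List.count 'W' cs = 0 <;> by_cases hU : List.count 'U' cs = 0 <;>
    by_cases hB : List.count 'B' cs = 0 <;> by_cases hR : List.count 'R' cs = 0 <;>
    by_cases hG : List.count 'G' cs = 0 <;> by_cases hC : List.count 'C' cs = 0 <;>
    simp [hW, hU, hB, hR, hG, hC,
      show String.mk ['W'] = "W" from rfl, show String.mk ['U'] = "U" from rfl,
      show String.mk ['B'] = "B" from rfl, show String.mk ['R'] = "R" from rfl,
      show String.mk ['G'] = "G" from rfl, show String.mk ['C'] = "C" from rfl]
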